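-- pv_equiv track=rewrite | github.com/Jrhenderson11/CTFTools | steg/stegger.py | diff_arrays
-- ===== SOURCE A (Python) =====
-- def diff_arrays(arr1, arr2):
-- 	diffed = []
--
-- 	#xor data to get key
-- 	for i in range(0, len(arr1)):
-- 		if (i%2==0):
-- 			#diffed.append(arr1[i]^arr2[i])
-- 			diffed.append(arr1[i])
-- 		else:
-- 			diffed.append(0)
-- 	return diffed
-- ===== SOURCE B (Python) =====
-- def diff_arrays(arr1, arr2):
-- 	res = [0] * len(arr1)
-- 	res[::2] = arr1[::2]
-- 	return res
-- ===== Notes on version B (the rewrite author's own statement) =====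
-- stated objective: idiomatic
-- what changed: Replaces the indexed loop with a per-index parity branch by allocating a zero-filled list and copying the even positions in with one strided slice assignment res[::2] = arr1[::2].
import Mathlib
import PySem

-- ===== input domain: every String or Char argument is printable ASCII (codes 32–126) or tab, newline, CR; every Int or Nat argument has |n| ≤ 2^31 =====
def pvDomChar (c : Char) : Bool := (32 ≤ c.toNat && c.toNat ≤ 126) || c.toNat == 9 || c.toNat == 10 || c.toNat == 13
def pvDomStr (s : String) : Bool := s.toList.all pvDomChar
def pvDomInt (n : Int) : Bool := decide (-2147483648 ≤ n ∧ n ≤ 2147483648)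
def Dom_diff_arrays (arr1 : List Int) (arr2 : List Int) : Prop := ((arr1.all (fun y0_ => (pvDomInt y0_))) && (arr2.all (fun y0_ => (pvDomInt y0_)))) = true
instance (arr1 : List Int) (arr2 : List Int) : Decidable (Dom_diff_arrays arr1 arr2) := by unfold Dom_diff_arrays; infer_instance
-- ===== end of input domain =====

-- B builds the result as a zero-filled list plus one strided slice assignment
-- (res[::2] = arr1[::2]) instead of A's indexed loop with a per-index parity branch.


-- ===== PORT A =====
-- for i in range(0, len(arr1)): if i%2==0: diffed.append(arr1[i]) else: diffed.append(0)
-- arr1[i] ported as pyGetD arr1 i 0: exact, since every i produced by the range is in range.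
def diff_arrays (arr1 : List Int) (_arr2 : List Int) : List Int :=
  (PySem.List.pyRange 0 arr1.length 1).foldl
    (fun diffed i =>
      if PySem.Int.mod i 2 == 0 then diffed ++ [PySem.List.pyGetD arr1 i 0]
      else diffed ++ [0])
    []

-- ===== PORT B =====
-- hand port of the strided slice assignment 'res[::2] = vs': exact here, since res is a
-- fresh list and |vs| = ceil(|res|/2), exactly the length Python requires for this target.
def pvAssignStride2 : List Int → List Int → List Int
  | xs, [] => xs
  | [], _ => []
  | _ :: xs, v :: vs =>
    match xs with
    | [] => [v]
    | y :: ys => v :: y :: pvAssignStride2 ys vs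

-- res = [0] * len(arr1); res[::2] = arr1[::2]; return res
def diff_arrays_alt (arr1 : List Int) (_arr2 : List Int) : List Int :=
  pvAssignStride2 (List.replicate arr1.length 0)
    ((PySem.List.slice? arr1 none none 2).getD [])

-- ===== PRECONDITION & SPEC =====
def Spec_diff_arrays (arr1 : List Int) (arr2 : List Int) (out : List Int) : Prop := out = diff_arrays_alt arr1 arr2
instance (arr1 : List Int) (arr2 : List Int) (out : List Int) : Decidable (Spec_diff_arrays arr1 arr2 out) := by unfold Spec_diff_arrays; infer_instance

-- ===== CLAIM (what is proved, stated in full; the proofs are below) =====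
def Claim_equal_diff_arrays : Prop := ∀ (arr1 : List Int) (arr2 : List Int), Dom_diff_arrays arr1 arr2 → Spec_diff_arrays arr1 arr2 (diff_arrays arr1 arr2)

-- ===== LEMMAS AND PROOFS =====

-- the common value of both ports: even-index elements kept, odd positions zeroed
def pvZipOut : List Int → List Int
  | [] => []
  | [a] => [a]
  | a :: _ :: t => a :: 0 :: pvZipOut t

-- the even-index elements of a list (what arr1[::2] denotes)
def pvEvens : List Int → List Int
  | [] => []
  | [a] => [a]
  | a :: _ :: t => a :: pvEvens t

lemma pv_two_step {P : List Int → Prop} (h0 : P []) (h1 : ∀ a, P [a])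
    (h2 : ∀ a b t, P t → P (a :: b :: t)) : ∀ l, P l
  | [] => h0
  | [a] => h1 a
  | a :: b :: t => h2 a b t (pv_two_step h0 h1 h2 t)

-- ---- A-side: the loop is the parity-selected map over range(len) ----

lemma pv_A_eq_map (arr1 arr2 : List Int) : diff_arrays arr1 arr2 =
    (List.range arr1.length).map (fun k => if k % 2 = 0 then arr1.getD k 0 else 0) := by
  unfold diff_arrays
  have h : (fun (diffed : List Int) (i : Int) =>
      if PySem.Int.mod i 2 == 0 then diffed ++ [PySem.List.pyGetD arr1 i 0] else diffed ++ [0])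
      = fun diffed i => diffed ++ [if PySem.Int.mod i 2 == 0 then PySem.List.pyGetD arr1 i 0 else 0] := by
    funext d i; split <;> rfl
  rw [h, PySem.List.foldl_append_singleton_eq_map, PySem.List.pyRange_one]
  simp only [List.nil_append, List.map_map, zero_add]
  refine List.map_congr_left fun k _ => ?_
  by_cases hk : (2:Int) ∣ (k:Int)
  · have h2 : k % 2 = 0 := by omega
    simp [hk, h2, PySem.List.pyGetD_natCast]
  · have h2 : ¬ k % 2 = 0 := by omega
    simp [hk, h2]

lemma pv_range_two (n : Nat) :
    List.range (n + 2) = 0 :: 1 :: (List.range n).map (fun k => k + 2) := by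
  rw [List.range_succ_eq_map, List.range_succ_eq_map, List.map_cons, List.map_map]
  refine congrArg _ (congrArg _ (List.map_congr_left fun k _ => ?_))
  simp [Function.comp]

lemma pv_map_eq_zipOut : ∀ l : List Int,
    (List.range l.length).map (fun k => if k % 2 = 0 then l.getD k 0 else 0) = pvZipOut l := by
  refine pv_two_step rfl (fun a => rfl) ?_
  intro a b t ih
  simp only [List.length_cons]
  rw [show t.length + 1 + 1 = t.length + 2 from rfl, pv_range_two]
  simp only [List.map_cons, List.map_map, pvZipOut]
  norm_num
  rw [← ih]
  exact List.map_congr_left fun k _ => by simp [Nat.add_mod_right]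

-- ---- B-side: arr1[::2] is pvEvens, and the slice assignment interleaves it with zeros ----

lemma pv_stride_map : ∀ xs : List Int,
    List.filterMap (fun k => xs[2 * k]?) (List.range ((xs.length + 1) / 2)) = pvEvens xs := by
  refine pv_two_step rfl (fun a => by simp [pvEvens]) ?_
  intro a b t ih
  have hc : ((a :: b :: t).length + 1) / 2 = (t.length + 1) / 2 + 1 := by
    simp only [List.length_cons]; omega
  rw [hc, List.range_succ_eq_map, List.filterMap_cons, List.filterMap_map]
  simp only [pvEvens]
  rw [← ih]
  have h : (fun k => (a :: b :: t)[2 * k.succ]?) = fun k => t[2 * k]? := by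
    funext k
    have : 2 * k.succ = 2 * k + 1 + 1 := by omega
    rw [this]
    simp
  simp [h]

lemma pv_slice2_eq_evens (xs : List Int) :
    PySem.List.slice? xs none none 2 = some (pvEvens xs) := by
  rw [PySem.List.slice?]
  simp only [PySem.List.sliceIndices]
  norm_num
  have h1 : (if 0 < xs.length then (((xs.length:Int) + 2 - 1) / 2).toNat else 0)
      = (xs.length + 1) / 2 := by
    split <;> omega
  rw [h1, ← pv_stride_map xs]
  have h2 : (fun x : Nat => xs[(2 * (x:Int)).toNat]?) = fun k : Nat => xs[2 * k]? := by
    funext k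
    have : ((2 * (k:Int))).toNat = 2 * k := by omega
    rw [this]
  rw [h2]

lemma pv_assign_eq_zipOut : ∀ l : List Int,
    pvAssignStride2 (List.replicate l.length 0) (pvEvens l) = pvZipOut l := by
  refine pv_two_step rfl (fun a => rfl) ?_
  intro a b t ih
  simp [pvEvens, pvZipOut, List.replicate, pvAssignStride2, ih]

theorem pv_main (arr1 arr2 : List Int) : diff_arrays arr1 arr2 = diff_arrays_alt arr1 arr2 := by
  rw [pv_A_eq_map arr1 arr2, pv_map_eq_zipOut arr1]
  rw [diff_arrays_alt, pv_slice2_eq_evens]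
  simpa using (pv_assign_eq_zipOut arr1).symm

-- ===== VERDICT (by name: the statement is the Claim_ definition above) =====
theorem diff_arrays_spec : Claim_equal_diff_arrays := by
  intro arr1 arr2 _
  unfold Spec_diff_arrays
  exact pv_main arr1 arr2
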